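-- pv_equiv track=rewrite | github.com/digwit678/OpenEvent-AI-FORK | backend/tests_integration/test_e2e_live_openai.py | _looks_like_real_api_key
-- ===== SOURCE A (Python) =====
-- from typing import Any, Dict, List, Optional, Tuple
--
-- _API_KEY_CHARS = set("abcdefghijklmnopqrstuvwxyzABCDEFGHIJKLMNOPQRSTUVWXYZ0123456789-_=")
--
-- def _looks_like_real_api_key(value: Optional[str]) -> bool:
--     if not value or not isinstance(value, str):
--         return False
--     trimmed = value.strip()
--     if len(trimmed) < 40:
--         return False
--     if " " in trimmed:
--         return False
--     if trimmed.endswith("..."):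
--         return False
--     if not trimmed.startswith("sk-"):
--         return False
--     if trimmed.lower().startswith("sk-proj-") and len(trimmed) < 45:
--         return False
--     if any(ch not in _API_KEY_CHARS for ch in trimmed):
--         return False
--     return True
-- ===== SOURCE B (Python) =====
-- _ALLOWED = frozenset("abcdefghijklmnopqrstuvwxyzABCDEFGHIJKLMNOPQRSTUVWXYZ0123456789-_=")
--
-- def _looks_like_real_api_key(value):
--     if not value or not isinstance(value, str):
--         return False
--     t = value.strip()
--     if len(t) < 40:
--         return False
--     # Single explicit character scan: consume the required "sk-" prefix
--     # positionally while checking every character against the allowed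
--     # alphabet.  This one pass subsumes the original's separate prefix,
--     # space and "..." checks.
--     need = "sk-"
--     for ch in t:
--         if ch not in _ALLOWED:
--             return False
--         if need:
--             if ch != need[0]:
--                 return False
--             need = need[1:]
--     if len(t) < 45 and t.lower().startswith("sk-proj-"):
--         return False
--     return True
-- ===== Notes on version B (the rewrite author's own statement) =====
-- stated objective: alternative
-- what changed: B replaces A's staged whole-string passes (space membership, ellipsis suffix, prefix test, character filter) by one explicit character-by-character scan with a remaining-prefix accumulator that consumes the required prefix while validating the alphabet in the same pass, which makes A's space and ellipsis checks redundant; only the sk-proj length guard stays a separate conditional.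
import Mathlib
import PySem

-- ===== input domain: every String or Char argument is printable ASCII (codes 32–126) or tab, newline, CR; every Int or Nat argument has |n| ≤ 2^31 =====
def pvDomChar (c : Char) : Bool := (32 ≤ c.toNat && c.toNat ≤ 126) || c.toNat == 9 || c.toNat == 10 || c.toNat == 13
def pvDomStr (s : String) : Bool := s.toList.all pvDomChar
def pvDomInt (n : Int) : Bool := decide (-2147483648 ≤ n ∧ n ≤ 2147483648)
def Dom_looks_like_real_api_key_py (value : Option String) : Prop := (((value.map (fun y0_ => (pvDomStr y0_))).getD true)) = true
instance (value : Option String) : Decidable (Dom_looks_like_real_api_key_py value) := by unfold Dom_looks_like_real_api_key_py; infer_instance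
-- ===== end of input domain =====

-- B replaces A's staged whole-string passes by one explicit char-by-char scan that consumes
-- the "sk-" prefix while validating the alphabet (alternative decomposition, same cost).

-- ===== PORT A =====
-- _API_KEY_CHARS = set("…")
def pvApiKeyChars : PySem.Set Char :=
  PySem.Set.ofList "abcdefghijklmnopqrstuvwxyzABCDEFGHIJKLMNOPQRSTUVWXYZ0123456789-_=".toList

def looks_like_real_api_key_py (value : Option String) : Bool :=
  match value with
  | none => false                                   -- 'not value' (None) / isinstance guard
  | some s =>
    if s.toList = [] then false                     -- 'not value' (empty string)
    else
      let trimmed := PySem.Chars.strip s.toList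
      if trimmed.length < 40 then false
      else if PySem.Chars.isIn [' '] trimmed then false
      else if PySem.Chars.endswith trimmed "...".toList then false
      else if !PySem.Chars.startswith trimmed "sk-".toList then false
      else if PySem.Chars.startswith (PySem.Chars.lower trimmed) "sk-proj-".toList
              && decide (trimmed.length < 45) then false
      else if trimmed.any (fun ch => !(PySem.Set.contains pvApiKeyChars ch)) then false
      else true

-- ===== PORT B =====
-- _ALLOWED = frozenset("…")
def pvAllowedChars : PySem.Set Char :=
  PySem.Set.ofList "abcdefghijklmnopqrstuvwxyzABCDEFGHIJKLMNOPQRSTUVWXYZ0123456789-_=".toList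

-- the for-loop of Source B: walk t once; 'need' is the not-yet-consumed part of "sk-"
def pvScan (need : List Char) : List Char → Bool
  | [] => true
  | ch :: rest =>
    if !(PySem.Set.contains pvAllowedChars ch) then false
    else
      match need with
      | [] => pvScan [] rest
      | p :: ps => if ch ≠ p then false else pvScan ps rest

def looks_like_real_api_key_py_alt (value : Option String) : Bool :=
  match value with
  | none => false
  | some s =>
    if s.toList = [] then false
    else
      let t := PySem.Chars.strip s.toList
      if t.length < 40 then false
      else if !pvScan "sk-".toList t then false
      else if decide (t.length < 45)
              && PySem.Chars.startswith (PySem.Chars.lower t) "sk-proj-".toList then false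
      else true

-- ===== PRECONDITION & SPEC =====
def Spec_looks_like_real_api_key_py (value : Option String) (out : Bool) : Prop := out = looks_like_real_api_key_py_alt value
instance (value : Option String) (out : Bool) : Decidable (Spec_looks_like_real_api_key_py value out) := by unfold Spec_looks_like_real_api_key_py; infer_instance

-- ===== CLAIM (what is proved, stated in full; the proofs are below) =====
def Claim_equal_looks_like_real_api_key_py : Prop := ∀ (value : Option String), Dom_looks_like_real_api_key_py value → Spec_looks_like_real_api_key_py value (looks_like_real_api_key_py value)

-- ===== LEMMAS AND PROOFS =====

lemma scan_nil (t : List Char) :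
    pvScan [] t = t.all (fun ch => PySem.Set.contains pvAllowedChars ch) := by
  induction t with
  | nil => rfl
  | cons ch rest ih =>
    simp only [pvScan, List.all_cons, ih]
    by_cases h : PySem.Set.contains pvAllowedChars ch = true <;> simp

-- The scan equals "prefix matches ∧ every char allowed" when the pattern's chars are
-- allowed and t is at least as long as the pattern.
lemma scan_eq (need : List Char) :
    ∀ t : List Char,
      need.all (fun ch => PySem.Set.contains pvAllowedChars ch) = true →
      need.length ≤ t.length →
      pvScan need t
        = (PySem.Chars.startswith t need
            && t.all (fun ch => PySem.Set.contains pvAllowedChars ch)) := by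
  induction need with
  | nil =>
    intro t _ _
    have : PySem.Chars.startswith t [] = true := by
      rw [PySem.Chars.startswith_iff]; exact List.nil_prefix
    rw [scan_nil, this, Bool.true_and]
  | cons p ps ih =>
    intro t hall hlen
    match t with
    | [] => simp at hlen
    | ch :: rest =>
      rw [List.all_cons, Bool.and_eq_true] at hall
      obtain ⟨hp, hps⟩ := hall
      have hsw : PySem.Chars.startswith (ch :: rest) (p :: ps)
          = (decide (ch = p) && PySem.Chars.startswith rest ps) := by
        rw [Bool.eq_iff_iff, Bool.and_eq_true, decide_eq_true_iff,
          PySem.Chars.startswith_iff, PySem.Chars.startswith_iff, List.cons_prefix_cons]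
        constructor
        · rintro ⟨h1, h2⟩; exact ⟨h1.symm, h2⟩
        · rintro ⟨h1, h2⟩; exact ⟨h1.symm, h2⟩
      rw [hsw]
      simp only [pvScan, List.all_cons]
      by_cases hcp : ch = p
      · subst hcp
        rw [ih rest hps (by simpa using hlen)]
        simp
        rw [Bool.and_left_comm]
      · by_cases hch : PySem.Set.contains pvAllowedChars ch = true <;>
          simp [hcp]

set_option maxRecDepth 8192 in
lemma space_not_allowed : PySem.Set.contains pvApiKeyChars ' ' = false := by decide

set_option maxRecDepth 8192 in
lemma dot_not_allowed : PySem.Set.contains pvApiKeyChars '.' = false := by decide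

lemma no_space_of_all (t : List Char)
    (h : t.all (fun ch => PySem.Set.contains pvApiKeyChars ch) = true) :
    PySem.Chars.isIn [' '] t = false := by
  apply Bool.eq_false_iff.mpr
  intro hin
  have hmem : ' ' ∈ t :=
    (List.singleton_infix_iff ' ' t).mp ((PySem.Chars.isIn_iff_infix [' '] t).mp hin)
  have hc := (List.all_eq_true.mp h) ' ' hmem
  rw [space_not_allowed] at hc
  exact Bool.false_ne_true hc

lemma no_dots_of_all (t : List Char)
    (h : t.all (fun ch => PySem.Set.contains pvApiKeyChars ch) = true) :
    PySem.Chars.endswith t "...".toList = false := by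
  apply Bool.eq_false_iff.mpr
  intro hend
  have hmem : '.' ∈ t :=
    ((PySem.Chars.endswith_iff t "...".toList).mp hend).subset (by decide)
  have hc := (List.all_eq_true.mp h) '.' hmem
  rw [dot_not_allowed] at hc
  exact Bool.false_ne_true hc

-- ===== VERDICT (by name: the statement is the Claim_ definition above) =====
set_option maxRecDepth 8192 in
theorem looks_like_real_api_key_py_spec : Claim_equal_looks_like_real_api_key_py := by
  intro value _
  unfold Spec_looks_like_real_api_key_py looks_like_real_api_key_py looks_like_real_api_key_py_alt
  match value with
  | none => rfl
  | some s =>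
    by_cases hnil : s.toList = []
    · simp [hnil]
    simp only [hnil, if_false]
    set t := PySem.Chars.strip s.toList with ht
    by_cases h40 : t.length < 40
    · simp [h40]
    rw [if_neg h40, if_neg h40]
    have hlen : ("sk-".toList).length ≤ t.length := by
      simp only [not_lt] at h40
      calc ("sk-".toList).length = 3 := by decide
        _ ≤ 40 := by norm_num
        _ ≤ t.length := h40
    rw [scan_eq "sk-".toList t (by decide) hlen]
    have hsets : pvAllowedChars = pvApiKeyChars := rfl
    rw [hsets]
    by_cases hall : t.all (fun ch => PySem.Set.contains pvApiKeyChars ch) = true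
    · have hany : t.any (fun ch => !(PySem.Set.contains pvApiKeyChars ch)) = false := by
        simpa [List.all_eq_not_any_not] using hall
      rw [no_space_of_all t hall, no_dots_of_all t hall, hall]
      cases hsk : PySem.Chars.startswith t "sk-".toList
      · simp
      · cases hproj : PySem.Chars.startswith (PySem.Chars.lower t) "sk-proj-".toList <;>
          by_cases h45 : t.length < 45 <;>
          simp [h45] <;>
          (intro x hx; simpa [PySem.Set.contains] using (List.all_eq_true.mp hall) x hx)
    · have hall' := Bool.eq_false_iff.mpr hall
      have hany : t.any (fun ch => !(PySem.Set.contains pvApiKeyChars ch)) = true := by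
        simpa [List.all_eq_not_any_not] using hall'
      rw [hall']
      simp only [Bool.and_false, Bool.not_false, if_true, hany]
      split_ifs <;> rfl
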